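-- pv_equiv track=rewrite | github.com/theobui1711/t2f | utils.py | zy_parse_output_sentence
-- ===== SOURCE A (Python) =====
-- import itertools
--
-- def zy_parse_output_sentence(output_sentence):
--     output_tokens = []
--     unmatched_predicted_entities = []
--
--     BEGIN_ENTITY_TOKEN = '['
--     END_ENTITY_TOKEN = ']'
--     SEPARATOR_TOKEN = '|'
--     RELATION_SEPARATOR_TOKEN = '='
--
--     # add spaces around special tokens, so that they are alone when we split
--     padded_output_sentence = output_sentence
--     for special_token in [
--         BEGIN_ENTITY_TOKEN, END_ENTITY_TOKEN,
--         SEPARATOR_TOKEN, RELATION_SEPARATOR_TOKEN,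
--     ]:
--         padded_output_sentence = padded_output_sentence.replace(special_token, ' ' + special_token + ' ')
--
--     entity_stack = []  # stack of the entities we are extracting from the output sentence
--     # this is a list of lists [start, state, entity_name_tokens, entity_other_tokens]
--     # where state is "name" (before the first | separator) or "other" (after the first | separator)
--
--     for token in padded_output_sentence.split():
--         if len(token) == 0:
--             continue
--
--         elif token == BEGIN_ENTITY_TOKEN:
--             # begin entity
--             start = len(output_tokens)
--             entity_stack.append([start, "other", [], []])
--
--         elif token == END_ENTITY_TOKEN and len(entity_stack) > 0:
--             # end entity
--             start, state, entity_name_tokens, entity_other_tokens = entity_stack.pop()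
--
--             entity_name = ' '.join(entity_name_tokens).strip()
--             end = len(output_tokens)
--
--             tags = []
--
--             # split entity_other_tokens by |
--             splits = [
--                 list(y) for x, y in itertools.groupby(entity_other_tokens, lambda z: z == SEPARATOR_TOKEN)
--                 if not x
--             ]
--
--             if state == "other" and len(splits) > 0:
--                 for x in splits:
--                     tags.append(tuple(' '.join(x).split(' ' + RELATION_SEPARATOR_TOKEN + ' ')))
--
--             unmatched_predicted_entities.append((entity_name, tags, start, end))
--
--         else:
--             # a normal token
--             if len(entity_stack) > 0:
--                 # inside some entities
--                 if token == SEPARATOR_TOKEN: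
--                     x = entity_stack[-1]
--
--                     if x[1] == "name":
--                         # this token marks the end of name tokens for the current entity
--                         x[1] = "other"
--                     else:
--                         # simply add this token to entity_other_tokens
--                         x[3].append(token)
--
--                 else:
--                     is_name_token = True
--
--                     for x in reversed(entity_stack):
--                         # check state
--                         if x[1] == "name":
--                             # add this token to entity_name_tokens
--                             x[2].append(token)
--
--                         else:
--                             # add this token to entity_other tokens and then stop going up in the tree
--                             x[3].append(token)
--                             is_name_token = False
--                             break
--
--                     if is_name_token:
--                         output_tokens.append(token)
--
--             else:
--                 # outside
--                 output_tokens.append(token)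
--
--     # update predicted entities with the positions in the original sentence
--     predicted_entities = []
--
--     for entity_name, entity_tags, start, end in unmatched_predicted_entities:
--         new_start = None  # start in the original sequence
--         new_end = None  # end in the original sequence
--
--         entity_tuple = (entity_name, entity_tags, new_start, new_end)
--         predicted_entities.append(entity_tuple)
--
--     return predicted_entities
-- ===== SOURCE B (Python) =====
-- import itertools
--
-- def zy_parse_output_sentence(output_sentence):
--     # tokenize exactly like A: pad the four special tokens with spaces, then split
--     s = output_sentence
--     for special in ['[', ']', '|', '=']:
--         s = s.replace(special, ' ' + special + ' ')
--     tokens = s.split()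
--
--     results = []
--
--     def finalize(buf):
--         groups = [list(y) for x, y in itertools.groupby(buf, lambda z: z == '|') if not x]
--         return [tuple(' '.join(g).split(' = ')) for g in groups]
--
--     def parse_entity(i):
--         # parse one entity body starting at token index i (just after its '[');
--         # returns the index after its ']', or None if the entity is never closed
--         buf = []
--         while i < len(tokens):
--             tok = tokens[i]
--             if tok == '[':
--                 i = parse_entity(i + 1)
--                 if i is None:
--                     return None
--             elif tok == ']':
--                 results.append(('', finalize(buf), None, None))
--                 return i + 1
--             else:
--                 buf.append(tok)
--                 i += 1
--         return None
--
--     i = 0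
--     while i < len(tokens):
--         if tokens[i] == '[':
--             j = parse_entity(i + 1)
--             if j is None:
--                 break
--             i = j
--         else:
--             i += 1
--     return results
-- ===== Notes on version B (the rewrite author's own statement) =====
-- stated objective: simpler
-- what changed: A's explicit stack machine (stack of [start, state, name_tokens, other_tokens] records with a dead 'name' state, a reversed-stack inner loop and a final position-erasing pass) is replaced by a recursive-descent parser: one helper parses a single entity body into a buffer, recursion handles nesting, entities are emitted directly in closing order.
import Mathlib
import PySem

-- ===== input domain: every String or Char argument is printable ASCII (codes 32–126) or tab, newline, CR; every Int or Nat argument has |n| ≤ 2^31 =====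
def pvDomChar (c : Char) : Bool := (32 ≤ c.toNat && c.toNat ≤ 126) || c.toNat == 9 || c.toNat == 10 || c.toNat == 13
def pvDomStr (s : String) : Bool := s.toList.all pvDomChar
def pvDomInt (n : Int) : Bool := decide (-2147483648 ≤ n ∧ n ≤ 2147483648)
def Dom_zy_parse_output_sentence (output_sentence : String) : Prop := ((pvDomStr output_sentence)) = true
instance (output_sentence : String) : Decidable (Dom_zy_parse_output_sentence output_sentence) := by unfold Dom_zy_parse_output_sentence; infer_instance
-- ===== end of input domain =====

-- B replaces A's explicit stack machine (a stack of 4-field mutable records threaded through one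
-- big token loop) by a recursive-descent parser: one helper parses a single entity body and
-- recursion handles nesting.  Objective: simpler; not faster (same linear pass).

-- Shared tokenization: both Pythons pad the four special tokens with spaces and split on whitespace.
def pvTokens (s : String) : List String :=
  PySem.Str.split₀
    (List.foldl (fun acc sp => PySem.Str.replace acc sp (" " ++ sp ++ " ")) s ["[", "]", "|", "="])

-- Shared port of the identical `itertools.groupby`-based tag extraction both Pythons perform:
-- maximal runs of non-"|" tokens …
def pvGroups : List String → List String → List (List String)
  | [], cur => if cur.isEmpty then [] else [cur]
  | t :: rest, cur =>
    if t == "|" then (if cur.isEmpty then [] else [cur]) ++ pvGroups rest []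
    else pvGroups rest (cur ++ [t])

-- … and each run `x` mapped through `tuple(' '.join(x).split(' = '))`.
def pvTagOf (g : List String) : List String :=
  -- `.split(' = ')`: the separator is nonempty, so `split?` is always `some`; `.getD []` is unreachable
  (PySem.Str.split? (PySem.Str.join " " g) " = ").getD []

-- ===== PORT A =====
-- A's stack entry [start, state, entity_name_tokens, entity_other_tokens];
-- the Lean list's HEAD is the END of Python's `entity_stack` (its top: append/pop/[-1] work there).
-- Python's `for x in reversed(entity_stack)` loop over normal tokens (with its is_name_token flag):
def zyAddTok (token : String) : List (Int × String × List String × List String) →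
    List (Int × String × List String × List String) × Bool
  | [] => ([], true)
  | (s, st, n, o) :: rest =>
    if st == "name" then
      let (rest', b) := zyAddTok token rest
      ((s, st, n ++ [token], o) :: rest', b)
    else ((s, st, n, o ++ [token]) :: rest, false)

-- one iteration of A's `for token in padded_output_sentence.split()` loop;
-- state = (output_tokens, unmatched_predicted_entities, entity_stack)
def zyStep (st : List String × List (String × List (List String) × Int × Int) ×
      List (Int × String × List String × List String)) (token : String) :
    List String × List (String × List (List String) × Int × Int) ×
      List (Int × String × List String × List String) :=
  let (out, res, stack) := st
  if PySem.Str.len token == 0 then (out, res, stack)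
  else if token == "[" then
    (out, res, ((out.length : Int), "other", ([] : List String), ([] : List String)) :: stack)
  else if token == "]" && decide (0 < stack.length) then
    match stack with
    | [] => (out, res, stack)
    | (start, state, nameToks, otherToks) :: rest =>
      let entityName := PySem.Str.strip (PySem.Str.join " " nameToks)
      let endPos := (out.length : Int)
      let splits := pvGroups otherToks []
      let tags := if state == "other" && decide (0 < splits.length) then splits.map pvTagOf else []
      (out, res ++ [(entityName, tags, start, endPos)], rest)
  else
    if decide (0 < stack.length) then
      if token == "|" then
        match stack with
        | [] => (out, res, stack)
        | (start, state, n, o) :: rest =>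
          if state == "name" then (out, res, (start, "other", n, o) :: rest)
          else (out, res, (start, state, n, o ++ [token]) :: rest)
      else
        let (stack', isName) := zyAddTok token stack
        (if isName then out ++ [token] else out, res, stack')
    else (out ++ [token], res, stack)

def zy_parse_output_sentence (output_sentence : String) :
    List (String × List (List String) × Option Int × Option Int) :=
  let fin := (pvTokens output_sentence).foldl zyStep ([], [], [])
  -- final loop: keep (entity_name, entity_tags), positions become None
  fin.2.1.map (fun e => (e.1, e.2.1, (none : Option Int), (none : Option Int)))

-- ===== PORT B =====
-- tags of one finished entity (B's `finalize`)
def pvFinalize (buf : List String) : List (List String) := (pvGroups buf []).map pvTagOf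

-- B's `parse_entity`: parse one entity body; `some rest` = tokens after its ']', `none` = never
-- closed.  (The subtype bound `rest.length < toks.length` only justifies termination.)
def pvParseEnt : (toks : List String) → List String →
    List (String × List (List String) × Option Int × Option Int) →
    Option {r : List String // r.length < toks.length} ×
      List (String × List (List String) × Option Int × Option Int)
  | [], _, acc => (none, acc)
  | t :: rest, buf, acc =>
    if t == "[" then
      match pvParseEnt rest [] acc with
      | (none, acc') => (none, acc')
      | (some ⟨r1, h1⟩, acc') =>
        match pvParseEnt r1 buf acc' with
        | (none, acc'') => (none, acc'')
        | (some ⟨r2, h2⟩, acc'') => (some ⟨r2, by simp only [List.length_cons]; omega⟩, acc'')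
    else if t == "]" then
      (some ⟨rest, by simp⟩, acc ++ [("", pvFinalize buf, none, none)])
    else
      match pvParseEnt rest (buf ++ [t]) acc with
      | (none, acc') => (none, acc')
      | (some ⟨r, h⟩, acc') => (some ⟨r, by simp only [List.length_cons]; omega⟩, acc')
termination_by toks _ _ => toks.length
decreasing_by all_goals simp only [List.length_cons]; omega

-- B's top-level loop: '[' starts an entity, every other token is ignored
def pvTop : List String → List (String × List (List String) × Option Int × Option Int) →
    List (String × List (List String) × Option Int × Option Int)
  | [], acc => acc
  | t :: rest, acc =>
    if t == "[" then
      match pvParseEnt rest [] acc with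
      | (none, acc') => acc'
      | (some ⟨r, _⟩, acc') => pvTop r acc'
    else pvTop rest acc
termination_by toks _ => toks.length
decreasing_by all_goals simp only [List.length_cons]; omega

def zy_parse_output_sentence_alt (output_sentence : String) :
    List (String × List (List String) × Option Int × Option Int) :=
  pvTop (pvTokens output_sentence) []

-- ===== PRECONDITION & SPEC =====
def Spec_zy_parse_output_sentence (output_sentence : String) (out : List (String × List (List String) × Option Int × Option Int)) : Prop := out = zy_parse_output_sentence_alt output_sentence
instance (output_sentence : String) (out : List (String × List (List String) × Option Int × Option Int)) : Decidable (Spec_zy_parse_output_sentence output_sentence out) := by unfold Spec_zy_parse_output_sentence; infer_instance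

-- ===== CLAIM (what is proved, stated in full; the proofs are below) =====
def Claim_equal_zy_parse_output_sentence : Prop := ∀ (output_sentence : String), Dom_zy_parse_output_sentence output_sentence → Spec_zy_parse_output_sentence output_sentence (zy_parse_output_sentence output_sentence)

-- ===== LEMMAS AND PROOFS =====

-- A's final per-entity projection (positions dropped)
def pvProj (e : String × List (List String) × Int × Int) :
    String × List (List String) × Option Int × Option Int :=
  (e.1, e.2.1, (none : Option Int), (none : Option Int))

-- every token produced by whitespace split is nonempty
lemma pvGo_ne_nil (s : List Char) : ∀ (cur : List Char) (acc : List (List Char)),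
    (∀ u ∈ acc, u ≠ []) → ∀ t ∈ PySem.Chars.split₀.go s cur acc, t ≠ [] := by
  induction s with
  | nil =>
    intro cur acc hacc t ht
    simp only [PySem.Chars.split₀.go] at ht
    split at ht
    · exact hacc t (List.mem_reverse.1 ht)
    · rcases List.mem_cons.1 (List.mem_reverse.1 ht) with h | h
      · rename_i hne; subst h; simpa [List.isEmpty_iff] using hne
      · exact hacc t h
  | cons c rest ih =>
    intro cur acc hacc t ht
    simp only [PySem.Chars.split₀.go] at ht
    split at ht
    · split at ht
      · exact ih [] acc hacc t ht
      · refine ih [] (cur.reverse :: acc) ?_ t ht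
        intro u hu
        rcases List.mem_cons.1 hu with h | h
        · rename_i hsp hne; subst h; simpa [List.isEmpty_iff] using hne
        · exact hacc u h
    · exact ih (c :: cur) acc hacc t ht

lemma pvTokens_ne_nil (s : String) : ∀ t ∈ pvTokens s, t.toList ≠ [] := by
  intro t ht
  simp only [pvTokens, PySem.Str.split₀, List.mem_map] at ht
  rcases ht with ⟨u, hu, rfl⟩
  rw [String.toList_ofList]
  exact pvGo_ne_nil _ [] [] (by simp) u hu

-- step lemmas about zyStep
lemma zyStep_push (out res stk) : zyStep (out, res, stk) "[" =
    (out, res, ((out.length : Int), "other", ([] : List String), ([] : List String)) :: stk) := rfl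

lemma zyStep_pop (out res start state nameToks otherToks rest) :
    zyStep (out, res, (start, state, nameToks, otherToks) :: rest) "]" =
    (out, res ++ [(PySem.Str.strip (PySem.Str.join " " nameToks),
        (if state == "other" && decide (0 < (pvGroups otherToks []).length)
          then (pvGroups otherToks []).map pvTagOf else []), start, (out.length : Int))], rest) := rfl

lemma zyStep_sep (out res start n o rest) :
    zyStep (out, res, (start, "other", n, o) :: rest) "|" =
    (out, res, (start, "other", n, o ++ ["|"]) :: rest) := rfl

lemma zyStep_tags (l : List (List String)) (f : List String → List String) :
    (if ("other" == "other") && decide (0 < l.length) then l.map f else []) = l.map f := by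
  cases l <;> simp

lemma zyStep_norm (t : String) (ht1 : (t == "[") = false) (ht2 : (t == "]") = false)
    (ht3 : (t == "|") = false) (ht0 : t.toList ≠ []) (out res start n o rest) :
    zyStep (out, res, (start, "other", n, o) :: rest) t =
    (out, res, (start, "other", n, o ++ [t]) :: rest) := by
  have htne : ¬ t = "" := by rintro rfl; exact ht0 rfl
  simp [zyStep, zyAddTok, PySem.Str.len, ht1, ht2, ht3, htne]

lemma zyStep_outside (t : String) (ht1 : (t == "[") = false) (ht0 : t.toList ≠ []) (out res) :
    zyStep (out, res, []) t = (out ++ [t], res, []) := by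
  have htne : ¬ t = "" := by rintro rfl; exact ht0 rfl
  simp [zyStep, PySem.Str.len, ht1, htne]

-- any non-bracket token is appended to the innermost open entity's buffer
lemma zyStep_app (t : String) (ht1 : (t == "[") = false) (ht2 : (t == "]") = false)
    (ht0 : t.toList ≠ []) (out res start n o rest) :
    zyStep (out, res, (start, "other", n, o) :: rest) t =
    (out, res, (start, "other", n, o ++ [t]) :: rest) := by
  by_cases hsep : t = "|"
  · subst hsep; exact zyStep_sep out res start n o rest
  · exact zyStep_norm t ht1 ht2 (by simp [hsep]) ht0 out res start n o rest

-- the core correspondence: parsing one entity body vs A's fold with that entity on top of the stack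
lemma pvCore : ∀ (toks buf : List String)
    (acc : List (String × List (List String) × Option Int × Option Int)),
    (∀ t ∈ toks, t.toList ≠ []) →
    ∀ (out : List String) (res : List (String × List (List String) × Int × Int))
      (stack : List (Int × String × List String × List String)) (start : Int),
      acc = res.map pvProj →
    (∀ r1 h1 acc', pvParseEnt toks buf acc = (some ⟨r1, h1⟩, acc') →
      ∃ res', List.foldl zyStep (out, res, (start, "other", ([] : List String), buf) :: stack) toks
          = List.foldl zyStep (out, res', stack) r1 ∧ acc' = res'.map pvProj ∧ ∀ t ∈ r1, t.toList ≠ [])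
    ∧ (∀ acc', pvParseEnt toks buf acc = (none, acc') →
      ((List.foldl zyStep (out, res, (start, "other", ([] : List String), buf) :: stack) toks).2.1).map pvProj = acc') := by
  intro toks buf acc
  induction toks, buf, acc using pvParseEnt.induct with
  | case1 buf acc =>
    intro hne out res stack start hacc
    constructor
    · intro r1 h1 acc' heq
      simp [pvParseEnt] at heq
    · intro acc' heq
      simp only [pvParseEnt, Prod.mk.injEq] at heq
      rw [← heq.2]; exact hacc.symm
  | case2 t rest buf acc hbr acc2 hinner ih =>
    intro hne out res stack start hacc
    have hne' : ∀ u ∈ rest, u.toList ≠ [] := fun u hu => hne u (List.mem_cons_of_mem _ hu)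
    have ht : t = "[" := by simpa using hbr
    constructor
    · intro r1 h1 acc' heq
      simp only [pvParseEnt, hbr, if_true, hinner] at heq
      simp at heq
    · intro acc' heq
      simp only [pvParseEnt, hbr, if_true, hinner] at heq
      obtain ⟨-, rfl⟩ := heq
      subst ht
      rw [List.foldl_cons, zyStep_push]
      exact (ih hne' out res ((start, "other", [], buf) :: stack) (out.length : Int) hacc).2 acc2 hinner
  | case3 t rest buf acc hbr r2 h2 acc2 hinner acc3 hcont ih1 ih2 =>
    intro hne out res stack start hacc
    have hne' : ∀ u ∈ rest, u.toList ≠ [] := fun u hu => hne u (List.mem_cons_of_mem _ hu)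
    have ht : t = "[" := by simpa using hbr
    obtain ⟨res1, hfold1, hacc2, hner2⟩ :=
      (ih1 hne' out res ((start, "other", [], buf) :: stack) (out.length : Int) hacc).1 r2 h2 acc2 hinner
    constructor
    · intro r1 h1 acc' heq
      simp only [pvParseEnt, hbr, if_true, hinner, hcont] at heq
      simp at heq
    · intro acc' heq
      simp only [pvParseEnt, hbr, if_true, hinner, hcont] at heq
      obtain ⟨-, rfl⟩ := heq
      subst ht
      rw [List.foldl_cons, zyStep_push, hfold1]
      exact (ih2 hner2 out res1 stack start hacc2).2 acc3 hcont
  | case4 t rest buf acc hbr r2 h2 acc2 hinner r3 h3 acc3 hcont ih1 ih2 =>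
    intro hne out res stack start hacc
    have hne' : ∀ u ∈ rest, u.toList ≠ [] := fun u hu => hne u (List.mem_cons_of_mem _ hu)
    have ht : t = "[" := by simpa using hbr
    obtain ⟨res1, hfold1, hacc2, hner2⟩ :=
      (ih1 hne' out res ((start, "other", [], buf) :: stack) (out.length : Int) hacc).1 r2 h2 acc2 hinner
    obtain ⟨res2, hfold2, hacc3, hner3⟩ :=
      (ih2 hner2 out res1 stack start hacc2).1 r3 h3 acc3 hcont
    constructor
    · intro r1 h1 acc' heq
      simp only [pvParseEnt, hbr, if_true, hinner, hcont, Prod.mk.injEq, Option.some.injEq,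
        Subtype.mk.injEq] at heq
      obtain ⟨rfl, rfl⟩ := heq
      refine ⟨res2, ?_, hacc3, hner3⟩
      subst ht
      rw [List.foldl_cons, zyStep_push, hfold1, hfold2]
    · intro acc' heq
      simp only [pvParseEnt, hbr, if_true, hinner, hcont] at heq
      simp at heq
  | case5 t rest buf acc hbr hcl =>
    intro hne out res stack start hacc
    have hne' : ∀ u ∈ rest, u.toList ≠ [] := fun u hu => hne u (List.mem_cons_of_mem _ hu)
    have ht : t = "]" := by simpa using hcl
    constructor
    · intro r1 h1 acc' heq
      simp only [pvParseEnt, hbr, hcl, if_true] at heq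
      obtain ⟨rfl, rfl⟩ := heq
      refine ⟨res ++ [(PySem.Str.strip (PySem.Str.join " " []),
        (pvGroups buf []).map pvTagOf, start, (out.length : Int))], ?_, ?_, hne'⟩
      · subst ht
        rw [List.foldl_cons, zyStep_pop, zyStep_tags]
      · simp [hacc, pvProj, pvFinalize]
        decide
    · intro acc' heq
      simp only [pvParseEnt, hbr, hcl, if_true] at heq
      simp at heq
  | case6 t rest buf acc hbr hcl acc2 hrec ih =>
    intro hne out res stack start hacc
    have hne' : ∀ u ∈ rest, u.toList ≠ [] := fun u hu => hne u (List.mem_cons_of_mem _ hu)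
    have hbr' : (t == "[") = false := by simpa using hbr
    have hcl' : (t == "]") = false := by simpa using hcl
    have ht0 : t.toList ≠ [] := hne t List.mem_cons_self
    constructor
    · intro r1 h1 acc' heq
      simp only [pvParseEnt, hbr, hcl, hrec] at heq
      simp at heq
    · intro acc' heq
      simp only [pvParseEnt, hbr, hcl, hrec] at heq
      obtain ⟨-, rfl⟩ := heq
      rw [List.foldl_cons, zyStep_app t hbr' hcl' ht0]
      exact (ih hne' out res stack start hacc).2 acc2 hrec
  | case7 t rest buf acc hbr hcl r2 h2 acc2 hrec ih =>
    intro hne out res stack start hacc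
    have hne' : ∀ u ∈ rest, u.toList ≠ [] := fun u hu => hne u (List.mem_cons_of_mem _ hu)
    have hbr' : (t == "[") = false := by simpa using hbr
    have hcl' : (t == "]") = false := by simpa using hcl
    have ht0 : t.toList ≠ [] := hne t List.mem_cons_self
    constructor
    · intro r1 h1 acc' heq
      simp only [pvParseEnt, hbr, hcl, hrec] at heq
      obtain ⟨rfl, rfl⟩ := heq
      obtain ⟨res1, hfold, hacc2, hner⟩ := (ih hne' out res stack start hacc).1 r2 h2 acc2 hrec
      refine ⟨res1, ?_, hacc2, hner⟩
      rw [List.foldl_cons, zyStep_app t hbr' hcl' ht0, hfold]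
    · intro acc' heq
      simp only [pvParseEnt, hbr, hcl, hrec] at heq
      simp at heq

lemma pvTopCore : ∀ (toks : List String)
    (acc : List (String × List (List String) × Option Int × Option Int)),
    (∀ t ∈ toks, t.toList ≠ []) →
    ∀ (out : List String) (res : List (String × List (List String) × Int × Int)),
      acc = res.map pvProj →
    pvTop toks acc = ((List.foldl zyStep (out, res, []) toks).2.1).map pvProj := by
  intro toks acc
  induction toks, acc using pvTop.induct with
  | case1 acc =>
    intro hne out res hacc
    simpa [pvTop] using hacc
  | case2 t rest acc hbr acc2 hinner =>
    intro hne out res hacc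
    have hne' : ∀ u ∈ rest, u.toList ≠ [] := fun u hu => hne u (List.mem_cons_of_mem _ hu)
    have ht : t = "[" := by simpa using hbr
    simp only [pvTop, hbr, if_true, hinner]
    subst ht
    rw [List.foldl_cons, zyStep_push]
    exact ((pvCore rest [] acc hne' out res [] (out.length : Int) hacc).2 acc2 hinner).symm
  | case3 t rest acc hbr r h acc2 hinner ih =>
    intro hne out res hacc
    have hne' : ∀ u ∈ rest, u.toList ≠ [] := fun u hu => hne u (List.mem_cons_of_mem _ hu)
    have ht : t = "[" := by simpa using hbr
    obtain ⟨res1, hfold, hacc2, hner⟩ :=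
      (pvCore rest [] acc hne' out res [] (out.length : Int) hacc).1 r h acc2 hinner
    simp only [pvTop, hbr, if_true, hinner]
    subst ht
    rw [List.foldl_cons, zyStep_push, hfold]
    exact ih hner out res1 hacc2
  | case4 t rest acc hbr ih =>
    intro hne out res hacc
    have hne' : ∀ u ∈ rest, u.toList ≠ [] := fun u hu => hne u (List.mem_cons_of_mem _ hu)
    have hbr' : (t == "[") = false := by simpa using hbr
    have ht0 : t.toList ≠ [] := hne t List.mem_cons_self
    simp only [pvTop, hbr]
    rw [List.foldl_cons, zyStep_outside t hbr' ht0]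
    exact ih hne' (out ++ [t]) res hacc

-- ===== VERDICT (by name: the statement is the Claim_ definition above) =====
theorem zy_parse_output_sentence_spec : Claim_equal_zy_parse_output_sentence := by
  intro s _
  unfold Spec_zy_parse_output_sentence zy_parse_output_sentence zy_parse_output_sentence_alt
  rw [pvTopCore (pvTokens s) [] (pvTokens_ne_nil s) [] []]
  · rfl
  · rfl
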